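-- pv_equiv track=rewrite | github.com/marccasals98/OCEAN | src/extraction.py | extract_species
-- ===== SOURCE A (Python) =====
-- class NonSpeciesException(Exception):
--     def __init__(self, message):
--         # Call the base class constructor with the custom message
--         super().__init__(message)
--
-- def extract_species(annotation_file_name):
--     '''
--     Extract species name and vocalization from the annotation file.
--
--     Arguments
--     ---------
--     annotation_file_name : string
--         file name of the annotations
--
--     Returns
--     -------
--     species: string
--         name of the species
--     vocalization: string
--         code of the vocalization
--     '''
--
--     annotation_file_name = annotation_file_name.lower().replace('.','').replace('_','').replace('-','') # lower case and delete '.' and '_' to cover the annotation names across datasets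
--
--     substrings_fin20plus = ['Bp20Plus'.lower(), 'Fin20Plus'.lower()]            # possible namings of Fin 20Plus call
--     substrings_fin20hz = ['Bp20Hz'.lower(), 'Fin20Hz'.lower(), 'Bp20'.lower()]  # possible namings of Fin 20Hz call
--     substrings_findwnswp = ['BpD'.lower(), 'FinD'.lower()]                      # possible namings of Fin Downsweep call
--
--     if 'BmAntA'.lower() in annotation_file_name:
--         species = 'Blue'
--         vocalization = 'Bm-Ant-A'
--     elif 'BmAntB'.lower() in annotation_file_name:
--         species = 'Blue'
--         vocalization = 'Bm-Ant-B'
--     elif 'BmAntZ'.lower() in annotation_file_name: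
--         species = 'Blue'
--         vocalization = 'Bm-Ant-Z'
--     elif 'BmD'.lower() in annotation_file_name:
--         species = 'Blue'
--         vocalization = 'Bm-D'
--     elif 'BmSWI'.lower() in annotation_file_name:
--         species = 'Blue'
--         vocalization = 'Bm-SWI'
--     elif any(substring in annotation_file_name for substring in substrings_fin20plus):
--         species = 'Fin'
--         vocalization = 'Bp-20Plus'
--     elif any(substring in annotation_file_name for substring in substrings_fin20hz):
--         species = 'Fin'
--         vocalization = 'Bp-20Hz'
--     elif any(substring in annotation_file_name for substring in substrings_findwnswp):
--         species = 'Fin'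
--         vocalization = 'Bp-Downsweep'
--     elif 'BpHigherCall'.lower() in annotation_file_name:
--         species = 'Fin'
--         vocalization = 'Bp-HigherCall'
--     elif 'Unid'.lower() in annotation_file_name:
--         species = 'Unidentified'
--         vocalization = ''
--     elif 'Minke'.lower() in annotation_file_name:
--         species = 'Minke'
--         vocalization = ''
--     elif 'Hump'.lower() in annotation_file_name:
--         species = 'Humpback'
--         vocalization = ''
--     else:
--         raise NonSpeciesException('Not able to identify species from file name')
--
--     return species, vocalization
-- ===== SOURCE B (Python) =====
-- class NonSpeciesException(Exception):
--     def __init__(self, message):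
--         super().__init__(message)
--
-- # Flat keyword map: each recognizable substring -> (priority, species, vocalization).
-- # Lower priority = earlier branch in the original chain; keywords sharing a rule share a priority.
-- _KEYWORDS = {
--     "bmanta": (0, "Blue", "Bm-Ant-A"),
--     "bmantb": (1, "Blue", "Bm-Ant-B"),
--     "bmantz": (2, "Blue", "Bm-Ant-Z"),
--     "bmd": (3, "Blue", "Bm-D"),
--     "bmswi": (4, "Blue", "Bm-SWI"),
--     "bp20plus": (5, "Fin", "Bp-20Plus"),
--     "fin20plus": (5, "Fin", "Bp-20Plus"),
--     "bp20hz": (6, "Fin", "Bp-20Hz"),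
--     "fin20hz": (6, "Fin", "Bp-20Hz"),
--     "bp20": (6, "Fin", "Bp-20Hz"),
--     "bpd": (7, "Fin", "Bp-Downsweep"),
--     "find": (7, "Fin", "Bp-Downsweep"),
--     "bphighercall": (8, "Fin", "Bp-HigherCall"),
--     "unid": (9, "Unidentified", ""),
--     "minke": (10, "Minke", ""),
--     "hump": (11, "Humpback", ""),
-- }
--
-- def extract_species(annotation_file_name):
--     name = annotation_file_name.lower().replace('.', '').replace('_', '').replace('-', '')
--     # Collect every keyword occurring in the name and keep the one of minimal priority
--     # (argmin accumulator; no ordered branch chain, no early exit).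
--     best = None
--     for sub, (prio, species, vocalization) in _KEYWORDS.items():
--         if sub in name and (best is None or prio < best[0]):
--             best = (prio, species, vocalization)
--     if best is None:
--         raise NonSpeciesException('Not able to identify species from file name')
--     return best[1], best[2]
-- ===== Notes on version B (the rewrite author's own statement) =====
-- stated objective: alternative
-- what changed: Replaces the 12-branch ordered if/elif chain by a flat keyword->(priority,species,vocalization) map scanned once with an argmin accumulator: every keyword found in the name is considered and the one of minimal priority wins, instead of short-circuiting through ordered branches.
import Mathlib
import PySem

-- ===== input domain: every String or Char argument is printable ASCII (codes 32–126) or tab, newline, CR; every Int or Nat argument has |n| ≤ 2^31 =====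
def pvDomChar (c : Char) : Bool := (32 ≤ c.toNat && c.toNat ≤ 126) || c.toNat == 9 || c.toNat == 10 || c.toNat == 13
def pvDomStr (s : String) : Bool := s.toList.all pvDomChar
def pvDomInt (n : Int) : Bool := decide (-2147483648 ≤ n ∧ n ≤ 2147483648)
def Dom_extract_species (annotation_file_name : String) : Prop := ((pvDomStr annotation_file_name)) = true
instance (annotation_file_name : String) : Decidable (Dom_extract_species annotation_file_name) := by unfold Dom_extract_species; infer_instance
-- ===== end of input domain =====

-- B replaces A's ordered if/elif chain by a flat keyword map scanned once with an argmin-by-priority accumulator (alternative, same cost).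
-- Both Pythons raise NonSpeciesException when no keyword matches; Pre_ excludes exactly those inputs.


-- ===== PORT A =====
-- name.lower().replace('.','').replace('_','').replace('-','')
def pvNormA (s : String) : String :=
  PySem.Str.replace (PySem.Str.replace (PySem.Str.replace (PySem.Str.lower s) "." "") "_" "") "-" ""

def extract_species (annotation_file_name : String) : String × String :=
  let n := pvNormA annotation_file_name
  let substrings_fin20plus := [PySem.Str.lower "Bp20Plus", PySem.Str.lower "Fin20Plus"]
  let substrings_fin20hz := [PySem.Str.lower "Bp20Hz", PySem.Str.lower "Fin20Hz", PySem.Str.lower "Bp20"]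
  let substrings_findwnswp := [PySem.Str.lower "BpD", PySem.Str.lower "FinD"]
  if PySem.Str.isIn (PySem.Str.lower "BmAntA") n then ("Blue", "Bm-Ant-A")
  else if PySem.Str.isIn (PySem.Str.lower "BmAntB") n then ("Blue", "Bm-Ant-B")
  else if PySem.Str.isIn (PySem.Str.lower "BmAntZ") n then ("Blue", "Bm-Ant-Z")
  else if PySem.Str.isIn (PySem.Str.lower "BmD") n then ("Blue", "Bm-D")
  else if PySem.Str.isIn (PySem.Str.lower "BmSWI") n then ("Blue", "Bm-SWI")
  else if substrings_fin20plus.any (fun sub => PySem.Str.isIn sub n) then ("Fin", "Bp-20Plus")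
  else if substrings_fin20hz.any (fun sub => PySem.Str.isIn sub n) then ("Fin", "Bp-20Hz")
  else if substrings_findwnswp.any (fun sub => PySem.Str.isIn sub n) then ("Fin", "Bp-Downsweep")
  else if PySem.Str.isIn (PySem.Str.lower "BpHigherCall") n then ("Fin", "Bp-HigherCall")
  else if PySem.Str.isIn (PySem.Str.lower "Unid") n then ("Unidentified", "")
  else if PySem.Str.isIn (PySem.Str.lower "Minke") n then ("Minke", "")
  else if PySem.Str.isIn (PySem.Str.lower "Hump") n then ("Humpback", "")
  else ("", "")  -- Python raises NonSpeciesException here; excluded by Pre_extract_species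

-- ===== PORT B =====
-- _KEYWORDS: keyword -> (priority, species, vocalization), in dict insertion order
def pvKeywords : List (String × Nat × String × String) :=
  [ ("bmanta", 0, "Blue", "Bm-Ant-A"),
    ("bmantb", 1, "Blue", "Bm-Ant-B"),
    ("bmantz", 2, "Blue", "Bm-Ant-Z"),
    ("bmd", 3, "Blue", "Bm-D"),
    ("bmswi", 4, "Blue", "Bm-SWI"),
    ("bp20plus", 5, "Fin", "Bp-20Plus"),
    ("fin20plus", 5, "Fin", "Bp-20Plus"),
    ("bp20hz", 6, "Fin", "Bp-20Hz"),
    ("fin20hz", 6, "Fin", "Bp-20Hz"),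
    ("bp20", 6, "Fin", "Bp-20Hz"),
    ("bpd", 7, "Fin", "Bp-Downsweep"),
    ("find", 7, "Fin", "Bp-Downsweep"),
    ("bphighercall", 8, "Fin", "Bp-HigherCall"),
    ("unid", 9, "Unidentified", ""),
    ("minke", 10, "Minke", ""),
    ("hump", 11, "Humpback", "") ]

-- the loop body: if sub in name and (best is None or prio < best[0]): best = (prio, species, vocalization)
def pvStep (name : String) (best : Option (Nat × String × String))
    (kv : String × Nat × String × String) : Option (Nat × String × String) :=
  if PySem.Str.isIn kv.1 name &&
     (match best with | none => true | some b => decide (kv.2.1 < b.1)) then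
    some kv.2
  else best

-- the loop: argmin-by-priority accumulator over every keyword present in the name
def pvBest (name : String) : Option (Nat × String × String) :=
  pvKeywords.foldl (pvStep name) none

-- returns best[1], best[2]; none = Python's raise, excluded by Pre_extract_species
def pvAltOut : Option (Nat × String × String) → String × String
  | some (_, species, vocalization) => (species, vocalization)
  | none => ("", "")

def extract_species_alt (annotation_file_name : String) : String × String :=
  pvAltOut (pvBest (PySem.Str.replace (PySem.Str.replace (PySem.Str.replace
    (PySem.Str.lower annotation_file_name) "." "") "_" "") "-" ""))

-- ===== PRECONDITION & SPEC =====
-- Pre_ excludes exactly the inputs on which Python A raises NonSpeciesException: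
-- the normalized name contains none of the recognized substrings.
def Pre_extract_species (annotation_file_name : String) : Prop :=
  (["bmanta", "bmantb", "bmantz", "bmd", "bmswi", "bp20plus", "fin20plus",
    "bp20hz", "fin20hz", "bp20", "bpd", "find", "bphighercall", "unid", "minke", "hump"].any
    (fun sub => PySem.Str.isIn sub
      (PySem.Str.replace (PySem.Str.replace (PySem.Str.replace
        (PySem.Str.lower annotation_file_name) "." "") "_" "") "-" ""))) = true

instance (annotation_file_name : String) : Decidable (Pre_extract_species annotation_file_name) := by
  unfold Pre_extract_species; infer_instance

def pvWitness_extract_species : String := "BmAnt-A_2019.wav"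

def Spec_extract_species (annotation_file_name : String) (out : String × String) : Prop :=
  out = extract_species_alt annotation_file_name
instance (annotation_file_name : String) (out : String × String) : Decidable (Spec_extract_species annotation_file_name out) := by unfold Spec_extract_species; infer_instance

-- ===== CLAIM (what is proved, stated in full; the proofs are below) =====
def Claim_equal_extract_species : Prop := ∀ (annotation_file_name : String), Dom_extract_species annotation_file_name → Pre_extract_species annotation_file_name → Spec_extract_species annotation_file_name (extract_species annotation_file_name)

-- ===== LEMMAS AND PROOFS =====

-- Once the accumulator holds a value whose priority is ≤ every remaining priority, it never changes.
theorem pvStable (name : String) (v : Nat × String × String)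
    (l : List (String × Nat × String × String))
    (h : l.all (fun kv => !decide (kv.2.1 < v.1)) = true) :
    l.foldl (pvStep name) (some v) = some v := by
  induction l with
  | nil => rfl
  | cons kv rest ih =>
    simp only [List.all_cons, Bool.and_eq_true] at h
    have hd : decide (kv.2.1 < v.1) = false := by simpa using h.1
    have hs : pvStep name (some v) kv = some v := by simp [pvStep, hd]
    rw [List.foldl_cons, hs, ih h.2]

-- With nondecreasing priorities the argmin fold is exactly the first matching entry.
theorem pvFoldFind (name : String) (l : List (String × Nat × String × String))
    (h : l.Pairwise (fun a b => a.2.1 ≤ b.2.1)) :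
    l.foldl (pvStep name) none
      = (l.find? (fun kv => PySem.Str.isIn kv.1 name)).map Prod.snd := by
  induction l with
  | nil => rfl
  | cons kv rest ih =>
    rw [List.pairwise_cons] at h
    cases hp : PySem.Str.isIn kv.1 name with
    | false =>
      have hs : pvStep name none kv = none := by unfold pvStep; rw [hp]; rfl
      rw [List.foldl_cons, hs, ih h.2]
      simp only [List.find?, hp]
    | true =>
      have hs : pvStep name none kv = some kv.2 := by unfold pvStep; rw [hp]; rfl
      have hall : rest.all (fun kv' => !decide (kv'.2.1 < kv.2.1)) = true := by
        rw [List.all_eq_true]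
        intro kv' hm
        simpa using h.1 kv' hm
      rw [List.foldl_cons, hs, pvStable name kv.2 rest hall]
      simp only [List.find?, hp, Option.map]

theorem pvBest_eq_find (name : String) :
    pvBest name = (pvKeywords.find? (fun kv => PySem.Str.isIn kv.1 name)).map Prod.snd :=
  pvFoldFind name pvKeywords (by decide)

-- ===== VERDICT (by name: the statement is the Claim_ definition above) =====
set_option maxHeartbeats 1600000
theorem extract_species_spec : Claim_equal_extract_species := by
  intro s _ _
  have l1 : PySem.Str.lower "BmAntA" = "bmanta" := by decide
  have l2 : PySem.Str.lower "BmAntB" = "bmantb" := by decide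
  have l3 : PySem.Str.lower "BmAntZ" = "bmantz" := by decide
  have l4 : PySem.Str.lower "BmD" = "bmd" := by decide
  have l5 : PySem.Str.lower "BmSWI" = "bmswi" := by decide
  have l6 : PySem.Str.lower "Bp20Plus" = "bp20plus" := by decide
  have l7 : PySem.Str.lower "Fin20Plus" = "fin20plus" := by decide
  have l8 : PySem.Str.lower "Bp20Hz" = "bp20hz" := by decide
  have l9 : PySem.Str.lower "Fin20Hz" = "fin20hz" := by decide
  have l10 : PySem.Str.lower "Bp20" = "bp20" := by decide
  have l11 : PySem.Str.lower "BpD" = "bpd" := by decide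
  have l12 : PySem.Str.lower "FinD" = "find" := by decide
  have l13 : PySem.Str.lower "BpHigherCall" = "bphighercall" := by decide
  have l14 : PySem.Str.lower "Unid" = "unid" := by decide
  have l15 : PySem.Str.lower "Minke" = "minke" := by decide
  have l16 : PySem.Str.lower "Hump" = "hump" := by decide
  unfold Spec_extract_species extract_species extract_species_alt pvNormA
  rw [pvBest_eq_find]
  simp only [l1, l2, l3, l4, l5, l6, l7, l8, l9, l10, l11, l12, l13, l14, l15, l16]
  set n := PySem.Str.replace (PySem.Str.replace (PySem.Str.replace
             (PySem.Str.lower s) "." "") "_" "") "-" "" with hn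
  cases h1 : PySem.Str.isIn "bmanta" n with
  | true => simp only [pvAltOut, pvKeywords, List.find?, List.any_cons, List.any_nil, Bool.false_or, Bool.or_false, Bool.true_or, Bool.false_eq_true, eq_self_iff_true, if_true, if_false, Option.map_some, Option.map_none, Option.map, h1]
  | false =>
    cases h2 : PySem.Str.isIn "bmantb" n with
    | true => simp only [pvAltOut, pvKeywords, List.find?, List.any_cons, List.any_nil, Bool.false_or, Bool.or_false, Bool.true_or, Bool.false_eq_true, eq_self_iff_true, if_true, if_false, Option.map_some, Option.map_none, Option.map, h1, h2]
    | false =>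
      cases h3 : PySem.Str.isIn "bmantz" n with
      | true => simp only [pvAltOut, pvKeywords, List.find?, List.any_cons, List.any_nil, Bool.false_or, Bool.or_false, Bool.true_or, Bool.false_eq_true, eq_self_iff_true, if_true, if_false, Option.map_some, Option.map_none, Option.map, h1, h2, h3]
      | false =>
        cases h4 : PySem.Str.isIn "bmd" n with
        | true => simp only [pvAltOut, pvKeywords, List.find?, List.any_cons, List.any_nil, Bool.false_or, Bool.or_false, Bool.true_or, Bool.false_eq_true, eq_self_iff_true, if_true, if_false, Option.map_some, Option.map_none, Option.map, h1, h2, h3, h4]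
        | false =>
          cases h5 : PySem.Str.isIn "bmswi" n with
          | true => simp only [pvAltOut, pvKeywords, List.find?, List.any_cons, List.any_nil, Bool.false_or, Bool.or_false, Bool.true_or, Bool.false_eq_true, eq_self_iff_true, if_true, if_false, Option.map_some, Option.map_none, Option.map, h1, h2, h3, h4, h5]
          | false =>
            cases h6 : PySem.Str.isIn "bp20plus" n with
            | true => simp only [pvAltOut, pvKeywords, List.find?, List.any_cons, List.any_nil, Bool.false_or, Bool.or_false, Bool.true_or, Bool.false_eq_true, eq_self_iff_true, if_true, if_false, Option.map_some, Option.map_none, Option.map, h1, h2, h3, h4, h5, h6]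
            | false =>
              cases h7 : PySem.Str.isIn "fin20plus" n with
              | true => simp only [pvAltOut, pvKeywords, List.find?, List.any_cons, List.any_nil, Bool.false_or, Bool.or_false, Bool.true_or, Bool.false_eq_true, eq_self_iff_true, if_true, if_false, Option.map_some, Option.map_none, Option.map, h1, h2, h3, h4, h5, h6, h7]
              | false =>
                cases h8 : PySem.Str.isIn "bp20hz" n with
                | true => simp only [pvAltOut, pvKeywords, List.find?, List.any_cons, List.any_nil, Bool.false_or, Bool.or_false, Bool.true_or, Bool.false_eq_true, eq_self_iff_true, if_true, if_false, Option.map_some, Option.map_none, Option.map, h1, h2, h3, h4, h5, h6, h7, h8]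
                | false =>
                  cases h9 : PySem.Str.isIn "fin20hz" n with
                  | true => simp only [pvAltOut, pvKeywords, List.find?, List.any_cons, List.any_nil, Bool.false_or, Bool.or_false, Bool.true_or, Bool.false_eq_true, eq_self_iff_true, if_true, if_false, Option.map_some, Option.map_none, Option.map, h1, h2, h3, h4, h5, h6, h7, h8, h9]
                  | false =>
                    cases h10 : PySem.Str.isIn "bp20" n with
                    | true => simp only [pvAltOut, pvKeywords, List.find?, List.any_cons, List.any_nil, Bool.false_or, Bool.or_false, Bool.true_or, Bool.false_eq_true, eq_self_iff_true, if_true, if_false, Option.map_some, Option.map_none, Option.map, h1, h2, h3, h4, h5, h6, h7, h8, h9, h10]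
                    | false =>
                      cases h11 : PySem.Str.isIn "bpd" n with
                      | true => simp only [pvAltOut, pvKeywords, List.find?, List.any_cons, List.any_nil, Bool.false_or, Bool.or_false, Bool.true_or, Bool.false_eq_true, eq_self_iff_true, if_true, if_false, Option.map_some, Option.map_none, Option.map, h1, h2, h3, h4, h5, h6, h7, h8, h9, h10, h11]
                      | false =>
                        cases h12 : PySem.Str.isIn "find" n with
                        | true => simp only [pvAltOut, pvKeywords, List.find?, List.any_cons, List.any_nil, Bool.false_or, Bool.or_false, Bool.true_or, Bool.false_eq_true, eq_self_iff_true, if_true, if_false, Option.map_some, Option.map_none, Option.map, h1, h2, h3, h4, h5, h6, h7, h8, h9, h10, h11, h12]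
                        | false =>
                          cases h13 : PySem.Str.isIn "bphighercall" n with
                          | true => simp only [pvAltOut, pvKeywords, List.find?, List.any_cons, List.any_nil, Bool.false_or, Bool.or_false, Bool.true_or, Bool.false_eq_true, eq_self_iff_true, if_true, if_false, Option.map_some, Option.map_none, Option.map, h1, h2, h3, h4, h5, h6, h7, h8, h9, h10, h11, h12, h13]
                          | false =>
                            cases h14 : PySem.Str.isIn "unid" n with
                            | true => simp only [pvAltOut, pvKeywords, List.find?, List.any_cons, List.any_nil, Bool.false_or, Bool.or_false, Bool.true_or, Bool.false_eq_true, eq_self_iff_true, if_true, if_false, Option.map_some, Option.map_none, Option.map, h1, h2, h3, h4, h5, h6, h7, h8, h9, h10, h11, h12, h13, h14]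
                            | false =>
                              cases h15 : PySem.Str.isIn "minke" n with
                              | true => simp only [pvAltOut, pvKeywords, List.find?, List.any_cons, List.any_nil, Bool.false_or, Bool.or_false, Bool.true_or, Bool.false_eq_true, eq_self_iff_true, if_true, if_false, Option.map_some, Option.map_none, Option.map, h1, h2, h3, h4, h5, h6, h7, h8, h9, h10, h11, h12, h13, h14, h15]
                              | false =>
                                cases h16 : PySem.Str.isIn "hump" n with
                                | true => simp only [pvAltOut, pvKeywords, List.find?, List.any_cons, List.any_nil, Bool.false_or, Bool.or_false, Bool.true_or, Bool.false_eq_true, eq_self_iff_true, if_true, if_false, Option.map_some, Option.map_none, Option.map, h1, h2, h3, h4, h5, h6, h7, h8, h9, h10, h11, h12, h13, h14, h15, h16]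
                                | false =>
                                  simp only [pvAltOut, pvKeywords, List.find?, List.any_cons, List.any_nil, Bool.false_or, Bool.or_false, Bool.true_or, Bool.false_eq_true, eq_self_iff_true, if_true, if_false, Option.map_some, Option.map_none, Option.map, h1, h2, h3, h4, h5, h6, h7, h8, h9, h10, h11, h12, h13, h14, h15, h16]
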